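-- pv_equiv track=rewrite | github.com/WFJKK/supervised-finetuning-steganography | generate_efficiency_datasets.py | lehmer_encode
-- ===== SOURCE A (Python) =====
-- import math
--
-- def lehmer_encode(payload, n):
--     max_payload = math.factorial(n)
--     if payload >= max_payload:
--         raise ValueError(f"Payload {payload} exceeds Lehmer capacity {max_payload} for n={n}")
--     available = list(range(n))
--     perm = []
--     remainder = payload
--     for i in range(n, 0, -1):
--         fact = math.factorial(i - 1)
--         idx = remainder // fact
--         remainder = remainder % fact
--         perm.append(available[idx])
--         available.pop(idx)
--     return perm
-- ===== SOURCE B (Python) =====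
-- import math
--
-- def lehmer_encode(payload, n):
--     max_payload = math.factorial(n)
--     if payload >= max_payload:
--         raise ValueError(f"Payload {payload} exceeds Lehmer capacity {max_payload} for n={n}")
--     # factorial-base digits by a single divmod chain (least-significant first),
--     # instead of recomputing factorials and dividing by them at every step
--     digits = []
--     r = payload
--     for i in range(1, n + 1):
--         r, d = divmod(r, i)
--         digits.append(d)
--     digits.reverse()
--     # decode: pick the d-th still-unused value with a flag array (no list pops)
--     used = [False] * n
--     perm = []
--     for d in digits:
--         v = 0
--         k = d
--         while used[v] or k > 0:
--             if not used[v]: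
--                 k -= 1
--             v += 1
--         used[v] = True
--         perm.append(v)
--     return perm
-- ===== Notes on version B (the rewrite author's own statement) =====
-- stated objective: alternative
-- what changed: B extracts the factorial-base digits with a single divmod chain by 1..n (A recomputes math.factorial(i-1) and divides by it at every step) and decodes by scanning a boolean used-flag array for the d-th unused value (A maintains a shrinking list and pops from it).
import Mathlib
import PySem

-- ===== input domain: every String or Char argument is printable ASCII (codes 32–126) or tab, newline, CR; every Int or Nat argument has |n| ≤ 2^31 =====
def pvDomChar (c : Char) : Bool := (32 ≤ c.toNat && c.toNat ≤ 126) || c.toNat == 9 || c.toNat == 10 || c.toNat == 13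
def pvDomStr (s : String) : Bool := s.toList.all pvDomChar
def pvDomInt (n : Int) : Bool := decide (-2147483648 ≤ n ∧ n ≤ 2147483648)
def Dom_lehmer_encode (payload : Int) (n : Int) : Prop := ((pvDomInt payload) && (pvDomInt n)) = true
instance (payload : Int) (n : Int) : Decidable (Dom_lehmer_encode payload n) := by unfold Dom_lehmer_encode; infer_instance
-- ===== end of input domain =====

-- B replaces A's per-step factorial recomputation by a single divmod chain and A's
-- select-and-pop list by a flag-array scan; equivalence is proved wherever A returns.

-- ===== PORT A =====
def lehmer_encode (payload : Int) (n : Int) : List Int :=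
  let max_payload : Int := (Nat.factorial n.toNat : Int)  -- math.factorial(n); exact for n ≥ 0 (n < 0 raises ValueError → outside Pre_)
  if payload ≥ max_payload then []  -- raise ValueError → outside Pre_
  else
    let st := (PySem.List.pyRange n 0 (-1)).foldl
      (fun (st : List Int × List Int × Int) i =>
        let available := st.1; let perm := st.2.1; let remainder := st.2.2
        let fact : Int := (Nat.factorial (i - 1).toNat : Int)  -- math.factorial(i-1); i ≥ 1 in this loop, exact
        let idx := PySem.Int.floordiv remainder fact
        let remainder := PySem.Int.mod remainder fact
        let perm := perm ++ [PySem.List.pyGetD available idx 0]  -- available[idx]; IndexError → outside Pre_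
        let available := ((PySem.List.pop? available idx).map Prod.snd).getD available  -- available.pop(idx); IndexError → outside Pre_
        (available, perm, remainder))
      (PySem.List.pyRange 0 n 1, ([] : List Int), payload)
    st.2.1

-- ===== PORT B =====
-- Source B's inner while loop: index of the k-th still-unused flag, scanning from position 0
def kthUnused : List Bool → Int → Int
  | [], _ => 0  -- Source B raises IndexError here (scan ran past the end) → outside Pre_
  | u :: rest, k =>
      if u then 1 + kthUnused rest k
      else if 0 < k then 1 + kthUnused rest (k - 1)
      else 0

def lehmer_encode_alt (payload : Int) (n : Int) : List Int :=
  let max_payload : Int := (Nat.factorial n.toNat : Int)  -- math.factorial(n)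
  if payload ≥ max_payload then []  -- raise ValueError → outside Pre_
  else
    let st := (PySem.List.pyRange 1 (n + 1) 1).foldl
      (fun (st : Int × List Int) i =>
        (PySem.Int.floordiv st.1 i, st.2 ++ [PySem.Int.mod st.1 i]))  -- r, d = divmod(r, i); digits.append(d)
      (payload, ([] : List Int))
    let digits := st.2.reverse
    let fin := digits.foldl
      (fun (st : List Bool × List Int) d =>
        let v := kthUnused st.1 d
        (PySem.List.pySetD st.1 v true, st.2 ++ [v]))  -- used[v] = True; perm.append(v)
      (List.replicate n.toNat false, ([] : List Int))
    fin.2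

-- ===== PRECONDITION & SPEC =====
-- Pre_ is exactly where A returns (on the |int| ≤ 2^31 domain Dom_ of this file): n ≥ 0
-- (math.factorial(n) raises ValueError otherwise), payload < n! (explicit ValueError
-- otherwise), and -n! ≤ payload when n > 0 (further below, the negative floor-div index
-- leaves Python's wraparound range and A raises IndexError; for n = 0 the loop is empty and
-- A returns [] for every payload < 1).  The '13 ≤ n' disjuncts change nothing on Dom_
-- (13! = 6227020800 > 2^31 bounds every Dom_ payload); they only keep the condition cheap
-- to decide by short-circuiting the factorial for large n.
def Pre_lehmer_encode (payload : Int) (n : Int) : Prop :=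
  0 ≤ n ∧ (13 ≤ n ∨ payload < (Nat.factorial n.toNat : Int)) ∧
    (n = 0 ∨ 13 ≤ n ∨ -(Nat.factorial n.toNat : Int) ≤ payload)
instance (payload : Int) (n : Int) : Decidable (Pre_lehmer_encode payload n) := by
  unfold Pre_lehmer_encode; infer_instance

def pvWitness_lehmer_encode : Int × Int := (3, 3)

def Spec_lehmer_encode (payload : Int) (n : Int) (out : List Int) : Prop := out = lehmer_encode_alt payload n
instance (payload : Int) (n : Int) (out : List Int) : Decidable (Spec_lehmer_encode payload n out) := by unfold Spec_lehmer_encode; infer_instance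

-- ===== CLAIM (what is proved, stated in full; the proofs are below) =====
def Claim_equal_lehmer_encode : Prop := ∀ (payload : Int) (n : Int), Dom_lehmer_encode payload n → Pre_lehmer_encode payload n → Spec_lehmer_encode payload n (lehmer_encode payload n)

-- ===== LEMMAS AND PROOFS =====

-- Common reference: A's loop body written as structural recursion on the step count.
def refDecode : Nat → Int → List Int → List Int
  | 0, _, _ => []
  | m + 1, r, avail =>
      let fact : Int := (Nat.factorial m : Int)
      let idx := PySem.Int.floordiv r fact
      PySem.List.pyGetD avail idx 0 ::
        refDecode m (PySem.Int.mod r fact)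
          (((PySem.List.pop? avail idx).map Prod.snd).getD avail)

-- A's fold over range(n, 0, -1) is refDecode (purely structural, no side conditions).
lemma A_loop (m : Nat) (r : Int) (avail perm : List Int) :
    ((PySem.List.pyRange (m : Int) 0 (-1)).foldl
      (fun (st : List Int × List Int × Int) i =>
        let available := st.1; let perm := st.2.1; let remainder := st.2.2
        let fact : Int := (Nat.factorial (i - 1).toNat : Int)
        let idx := PySem.Int.floordiv remainder fact
        let remainder := PySem.Int.mod remainder fact
        let perm := perm ++ [PySem.List.pyGetD available idx 0]
        let available := ((PySem.List.pop? available idx).map Prod.snd).getD available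
        (available, perm, remainder))
      (avail, perm, r)).2.1 = perm ++ refDecode m r avail := by
  induction m generalizing r avail perm with
  | zero => simp [PySem.List.pyRange_neg_one_eq_nil (by omega : (0:Int) ≤ 0), refDecode]
  | succ m ih =>
      rw [PySem.List.pyRange_neg_one_cons (by positivity : (0:Int) < (m+1 : Nat))]
      have h1 : ((m + 1 : Nat) : Int) - 1 = (m : Nat) := by push_cast; ring
      simp only [List.foldl_cons, h1, Int.toNat_natCast]
      rw [ih]
      simp [refDecode]

-- B's divmod chain: closed form of the factorial-base digits (least significant first).
lemma chain_spec (m : Nat) (r : Int) (ds : List Int) :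
    ((PySem.List.pyRange 1 ((m : Int) + 1) 1).foldl
      (fun (st : Int × List Int) i =>
        (PySem.Int.floordiv st.1 i, st.2 ++ [PySem.Int.mod st.1 i]))
      (r, ds))
    = (PySem.Int.floordiv r (Nat.factorial m : Int),
       ds ++ (List.range m).map
         (fun k => PySem.Int.mod (PySem.Int.floordiv r (Nat.factorial k : Int)) ((k : Int) + 1))) := by
  induction m with
  | zero =>
      simp [Nat.factorial]
  | succ m ih =>
      have hsplit : ((m + 1 : Nat) : Int) + 1 = ((m : Int) + 1) + 1 := by push_cast; ring
      rw [hsplit, PySem.List.pyRange_one_succ_right (by omega : (1:Int) ≤ (m:Int)+1),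
        List.foldl_append, ih]
      simp only [List.foldl_cons, List.foldl_nil, List.range_succ, List.map_append, List.map_cons,
        List.map_nil, List.append_assoc]
      have hm : (0:Int) < (Nat.factorial m : Int) := by exact_mod_cast Nat.factorial_pos m
      have hdiv : PySem.Int.floordiv (PySem.Int.floordiv r (Nat.factorial m : Int)) ((m:Int) + 1)
          = PySem.Int.floordiv r (Nat.factorial (m+1) : Int) := by
        rw [PySem.Int.floordiv_eq_ediv_of_pos hm,
            PySem.Int.floordiv_eq_ediv_of_pos (by omega : (0:Int) < (m:Int)+1),
            PySem.Int.floordiv_eq_ediv_of_pos (by exact_mod_cast Nat.factorial_pos (m+1))]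
        rw [Int.ediv_ediv_of_nonneg (le_of_lt hm)]
        congr 1
        push_cast [Nat.factorial_succ]
        ring
      rw [hdiv]

-- digit k of the factorial-base expansion only depends on r modulo m!, for k < m
lemma digit_stable (m k : Nat) (r : Int) (hk : k < m) :
    PySem.Int.mod (PySem.Int.floordiv (PySem.Int.mod r (Nat.factorial m : Int)) (Nat.factorial k : Int)) ((k : Int) + 1)
    = PySem.Int.mod (PySem.Int.floordiv r (Nat.factorial k : Int)) ((k : Int) + 1) := by
  have hK : (0:Int) < (Nat.factorial k : Int) := by exact_mod_cast Nat.factorial_pos k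
  have hk1 : (0:Int) < (k:Int) + 1 := by omega
  obtain ⟨U, hU⟩ : Nat.factorial (k+1) ∣ Nat.factorial m := Nat.factorial_dvd_factorial (by omega)
  -- m! = k! * ((k+1) * U)
  have hfac : (Nat.factorial m : Int) = (Nat.factorial k : Int) * (((k:Int)+1) * (U:Nat)) := by
    push_cast [hU, Nat.factorial_succ]
    ring
  rw [PySem.Int.mod_eq_emod_of_pos hk1, PySem.Int.mod_eq_emod_of_pos hk1,
      PySem.Int.floordiv_eq_ediv_of_pos hK, PySem.Int.floordiv_eq_ediv_of_pos hK]
  have hsum := PySem.Int.floordiv_mul_add_mod r (Nat.factorial m : Int)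
  set q := PySem.Int.floordiv r (Nat.factorial m : Int) with hq
  set s := PySem.Int.mod r (Nat.factorial m : Int) with hs
  have hr : r = s + (q * (((k:Int)+1) * (U:Nat))) * (Nat.factorial k : Int) := by
    rw [hfac] at hsum
    linarith [hsum]
  rw [hr, Int.add_mul_ediv_right _ _ (ne_of_gt hK)]
  have : s / (Nat.factorial k : Int) + q * (((k:Int)+1) * (U:Nat))
      = s / (Nat.factorial k : Int) + ((k:Int)+1) * (q * (U:Nat)) := by ring
  rw [this, Int.add_mul_emod_self_left]

-- the (Int) positions of the False flags, in increasing order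
def falseIdx : List Bool → List Int
  | [] => []
  | b :: bs => if b then (falseIdx bs).map (· + 1) else 0 :: (falseIdx bs).map (· + 1)

-- kthUnused finds the k-th False position, and marking it erases that position
lemma kth_spec (flags : List Bool) (k : Nat) (h : k < (falseIdx flags).length) :
    kthUnused flags (k : Int) = (falseIdx flags).getD k 0
    ∧ 0 ≤ kthUnused flags (k : Int)
    ∧ falseIdx (PySem.List.pySetD flags (kthUnused flags (k : Int)) true)
      = (falseIdx flags).eraseIdx k := by
  induction flags generalizing k with
  | nil => simp [falseIdx] at h
  | cons b bs ih =>
      cases b with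
      | true =>
          simp only [falseIdx, if_true, List.length_map] at h ⊢
          obtain ⟨h1, h2, h3⟩ := ih k h
          refine ⟨?_, by simp [kthUnused]; omega, ?_⟩
          · simp only [kthUnused, if_true, h1, List.getD_eq_getElem?_getD]
            simp [List.getElem?_eq_getElem h]
            ring
          · simp only [kthUnused, if_true]
            rw [PySem.List.pySetD_of_nonneg _ _ (by omega : (0:Int) ≤ 1 + kthUnused bs (k:Int))]
            have ht : (1 + kthUnused bs (k:Int)).toNat = (kthUnused bs (k:Int)).toNat + 1 := by omega
            rw [ht, List.set_cons_succ]
            rw [PySem.List.pySetD_of_nonneg _ _ h2] at h3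
            simp [falseIdx, h3, List.eraseIdx_map]
      | false =>
          cases k with
          | zero =>
              refine ⟨by simp [kthUnused, falseIdx], by simp [kthUnused], ?_⟩
              simp only [kthUnused, Bool.false_eq_true, if_false, lt_irrefl, Nat.cast_zero]
              rw [PySem.List.pySetD_of_nonneg _ _ (by omega : (0:Int) ≤ 0)]
              simp [falseIdx]
          | succ j =>
              simp only [falseIdx, Bool.false_eq_true, if_false, List.length_cons, List.length_map] at h ⊢
              have hj : j < (falseIdx bs).length := by omega
              obtain ⟨h1, h2, h3⟩ := ih j hj
              have hpos : (0:Int) < ((j+1 : Nat) : Int) := by positivity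
              have hcast : ((j+1 : Nat) : Int) - 1 = (j : Nat) := by push_cast; ring
              refine ⟨?_, ?_, ?_⟩
              · simp only [kthUnused, Bool.false_eq_true, if_false, if_pos hpos, hcast, h1,
                  List.getD_eq_getElem?_getD, List.getElem?_cons_succ]
                simp [List.getElem?_eq_getElem hj]
                ring
              · simp only [kthUnused, Bool.false_eq_true, if_false, if_pos hpos, hcast]
                omega
              · simp only [kthUnused, Bool.false_eq_true, if_false, if_pos hpos, hcast]
                rw [PySem.List.pySetD_of_nonneg _ _ (by omega : (0:Int) ≤ 1 + kthUnused bs (j:Int))]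
                have ht : (1 + kthUnused bs (j:Int)).toNat = (kthUnused bs (j:Int)).toNat + 1 := by omega
                rw [ht, List.set_cons_succ]
                rw [PySem.List.pySetD_of_nonneg _ _ h2] at h3
                simp [falseIdx, h3, List.eraseIdx_map]

lemma falseIdx_replicate (m : Nat) :
    falseIdx (List.replicate m false) = (List.range m).map Int.ofNat := by
  induction m with
  | zero => simp [falseIdx]
  | succ m ih =>
      rw [List.replicate_succ, List.range_succ_eq_map]
      simp only [falseIdx, Bool.false_eq_true, if_false, ih, List.map_cons, List.map_map]
      refine congrArg (Int.ofNat 0 :: ·) ?_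
      apply List.map_congr_left
      intro a _
      simp [Function.comp]

-- B's select-and-mark fold consumes the reversed digit list exactly as refDecode does.
lemma decode_spec (m : Nat) (r : Int) (flags : List Bool) (perm : List Int)
    (hlo : -(Nat.factorial m : Int) ≤ r) (hhi : r < (Nat.factorial m : Int))
    (hlen : (falseIdx flags).length = m) :
    ((((List.range m).map
        (fun k => PySem.Int.mod (PySem.Int.floordiv r (Nat.factorial k : Int)) ((k : Int) + 1))).reverse).foldl
      (fun (st : List Bool × List Int) d =>
        let v := kthUnused st.1 d
        (PySem.List.pySetD st.1 v true, st.2 ++ [v]))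
      (flags, perm)).2
    = perm ++ refDecode m r (falseIdx flags) := by
  induction m generalizing r flags perm with
  | zero => simp [refDecode]
  | succ m ih =>
      have hF : (0:Int) < (Nat.factorial m : Int) := by exact_mod_cast Nat.factorial_pos m
      have hfacsucc : (Nat.factorial (m+1) : Int) = ((m:Int)+1) * (Nat.factorial m : Int) := by
        push_cast [Nat.factorial_succ]; ring
      set F : Int := (Nat.factorial m : Int) with hFdef
      set q : Int := PySem.Int.floordiv r F with hq
      -- bounds on the raw index q
      have hqlt : q < (m:Int) + 1 := by
        rw [hq, PySem.Int.floordiv_lt_iff_lt_mul hF]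
        rw [hfacsucc] at hhi; linarith
      have hqge : -((m:Int) + 1) ≤ q := by
        rw [hq, PySem.Int.le_floordiv_iff_mul_le hF]
        rw [hfacsucc] at hlo; linarith
      -- the top digit d = q mod (m+1), and its Nat form jn
      have hm1 : (0:Int) < (m:Int) + 1 := by omega
      set d : Int := PySem.Int.mod q ((m:Int) + 1) with hd
      have hd0 : 0 ≤ d := PySem.Int.mod_nonneg _ hm1
      have hdlt : d < (m:Int) + 1 := PySem.Int.mod_lt _ hm1
      set jn : Nat := d.toNat with hjn
      have hjcast : (jn : Int) = d := Int.toNat_of_nonneg hd0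
      have hjlt : jn < m + 1 := by omega
      -- d is q, shifted into range when q is a negative (wraparound) index
      have hdq : d = if q < 0 then q + ((m:Int)+1) else q := by
        rw [hd, PySem.Int.mod_eq_emod_of_pos hm1]
        split_ifs with hneg
        · have h1 : (q + ((m:Int)+1)) % ((m:Int)+1) = q % ((m:Int)+1) := by
            have := Int.add_mul_emod_self_left (a := q) (b := (m:Int)+1) (c := 1)
            simpa using this
          rw [← h1, Int.emod_eq_of_lt (by omega) (by omega)]
        · exact Int.emod_eq_of_lt (by omega) (by omega)
      -- unfold one layer of the digit list
      rw [List.range_succ, List.map_append, List.reverse_append]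
      simp only [List.map_cons, List.map_nil, List.reverse_cons, List.reverse_nil,
        List.nil_append, List.cons_append, List.foldl_cons]
      -- the first step picks v = avail.getD jn 0 and erases it
      have hk := kth_spec flags jn (by omega)
      have hkv : kthUnused flags (PySem.Int.mod (PySem.Int.floordiv r F) ((m:Int)+1))
          = kthUnused flags ((jn : Int)) := by rw [hjcast, ← hq, ← hd]
      obtain ⟨hk1, hk2, hk3⟩ := hk
      -- rewrite the remaining digits to use r % m! via digit_stable
      have hmapstable : (List.range m).map
            (fun k => PySem.Int.mod (PySem.Int.floordiv r (Nat.factorial k : Int)) ((k : Int) + 1))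
          = (List.range m).map
            (fun k => PySem.Int.mod (PySem.Int.floordiv (PySem.Int.mod r F) (Nat.factorial k : Int)) ((k : Int) + 1)) := by
        apply List.map_congr_left
        intro k hkmem
        exact (digit_stable m k r (List.mem_range.mp hkmem)).symm
      have hr'0 : 0 ≤ PySem.Int.mod r F := PySem.Int.mod_nonneg _ hF
      have hr'lt : PySem.Int.mod r F < F := PySem.Int.mod_lt _ hF
      have hlen' : (falseIdx (PySem.List.pySetD flags (kthUnused flags ((jn:Int))) true)).length = m := by
        rw [hk3, List.length_eraseIdx]
        simp [hlen]
        omega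
      -- refDecode's head and tail agree with the flag-scan step (incl. negative wraparound)
      have hC1 : PySem.List.pyGetD (falseIdx flags) q 0 = (falseIdx flags).getD jn 0 := by
        by_cases hneg : q < 0
        · have hkq : q = -(((-q).toNat : Nat) : Int) := by omega
          have hkq1 : 0 < (-q).toNat := by omega
          have hkq2 : (-q).toNat ≤ (falseIdx flags).length := by omega
          rw [hkq, PySem.List.pyGetD_neg_natCast _ _ _ hkq1 hkq2]
          have hjn' : jn = (falseIdx flags).length - (-q).toNat := by
            rw [hdq] at hjn; simp [hneg] at hjn; omega
          rw [List.getD_eq_getElem _ _ (by omega)]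
          congr 1
          omega
        · push_neg at hneg
          have : d = q := by rw [hdq, if_neg (by omega)]
          rw [PySem.List.pyGetD_eq_getElem _ _ hneg (by exact_mod_cast (by omega : q < ((falseIdx flags).length : Int)))]
          rw [List.getD_eq_getElem _ _ (by omega)]
          congr 1
          omega
      have hC2 : ((PySem.List.pop? (falseIdx flags) q).map Prod.snd).getD (falseIdx flags)
          = (falseIdx flags).eraseIdx jn := by
        by_cases hneg : q < 0
        · have hpi : PySem.List.pyIdx? (falseIdx flags).length q = some jn := by
            simp only [PySem.List.pyIdx?, if_neg (by omega : ¬ (0:Int) ≤ q),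
              if_pos (by omega : -((falseIdx flags).length:Int) ≤ q)]
            congr 1
            rw [hdq] at hjn; simp [hneg] at hjn; omega
          simp [PySem.List.pop?, hpi,
            List.getElem?_eq_getElem (by omega : jn < (falseIdx flags).length)]
        · push_neg at hneg
          have hqn : q = ((q.toNat : Nat) : Int) := by omega
          have hqjn : q.toNat = jn := by
            rw [hdq] at hjn; simp [not_lt.mpr hneg] at hjn; omega
          rw [hqn, PySem.List.pop?_natCast _ _ (by omega : q.toNat < (falseIdx flags).length)]
          simp [hqjn]
      -- put it together
      rw [hkv, hmapstable, ih (PySem.Int.mod r F) _ _ (by omega) (by omega) hlen']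
      simp only [refDecode, ← hFdef, ← hq, ← hd]
      rw [hk3, hk1, hC1, hC2]
      simp

lemma lehmer_eq_alt (payload n : Int) (h0n : 0 ≤ n)
    (hlt : payload < (Nat.factorial n.toNat : Int))
    (hor : n = 0 ∨ -(Nat.factorial n.toNat : Int) ≤ payload) :
    lehmer_encode payload n = lehmer_encode_alt payload n := by
  rcases hor with h0 | hneg
  · -- n = 0: both loops are empty
    subst h0
    simp only [lehmer_encode, lehmer_encode_alt, Int.toNat_zero, Nat.factorial_zero,
      Nat.cast_one, ge_iff_le, if_neg (not_le.mpr hlt)]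
    rw [PySem.List.pyRange_neg_one_eq_nil (by omega : (0:Int) ≤ 0),
        PySem.List.pyRange_one_eq_nil (by omega : (0:Int) + 1 ≤ 1)]
    simp
  · set N : Nat := n.toNat with hN
    have hn : n = (N : Int) := by omega
    have hlenflags : (falseIdx (List.replicate N false)).length = N := by
      rw [falseIdx_replicate]; simp
    have havail : falseIdx (List.replicate N false) = PySem.List.pyRange 0 (N : Int) 1 := by
      rw [falseIdx_replicate, PySem.List.pyRange_one]
      simp
    simp only [lehmer_encode, lehmer_encode_alt, ge_iff_le, if_neg (not_le.mpr hlt)]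
    rw [hn] at *
    rw [A_loop N payload _ []]
    rw [chain_spec N payload []]
    simp only [List.nil_append]
    rw [Int.toNat_natCast]
    rw [decode_spec N payload (List.replicate N false) [] (by exact_mod_cast hneg)
      (by exact_mod_cast hlt) hlenflags]
    rw [havail]
    simp

-- ===== VERDICT (by name: the statement is the Claim_ definition above) =====
theorem lehmer_encode_spec : Claim_equal_lehmer_encode := by
  intro payload n hDom hPre
  unfold Spec_lehmer_encode
  obtain ⟨h0n, hlt', hor'⟩ := hPre
  have hDom' : -2147483648 ≤ payload ∧ payload ≤ 2147483648 := by
    have := hDom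
    simp only [Dom_lehmer_encode, pvDomInt, Bool.and_eq_true, decide_eq_true_eq] at this
    exact ⟨this.1.1, this.1.2⟩
  have hfact13 : ∀ hn : 13 ≤ n, (6227020800 : Int) ≤ (Nat.factorial n.toNat : Int) := by
    intro hn
    have h1 : Nat.factorial 13 ≤ Nat.factorial n.toNat :=
      Nat.factorial_le (by omega)
    have h2 : Nat.factorial 13 = 6227020800 := by norm_num [Nat.factorial]
    exact_mod_cast h2 ▸ h1
  have hlt : payload < (Nat.factorial n.toNat : Int) := by
    rcases hlt' with hn | h
    · have := hfact13 hn; omega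
    · exact h
  have hor : n = 0 ∨ -(Nat.factorial n.toNat : Int) ≤ payload := by
    rcases hor' with h0 | hn | h
    · exact Or.inl h0
    · right; have := hfact13 hn; omega
    · exact Or.inr h
  exact lehmer_eq_alt payload n h0n hlt hor
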